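-- pv_equiv track=rewrite | github.com/miliar/Code_Jam_Webscraper | solutions_python/Problem_201/2913.py | getBetter
-- ===== SOURCE A (Python) =====
-- def ls(i, tab):
-- 	j = i
--
-- 	while (j>0) and (tab[j - 1]):
-- 		j -= 1
-- 	return i - j
--
-- def rs(i, tab):
-- 	j = i
--
-- 	while (j<len(tab) - 1) and (tab[j + 1]):
-- 		j += 1
-- 	return j - i
--
-- def getBetter(tab):
-- 	mini = 0
-- 	maxi = 0
-- 	bi = 0
-- 	for i in range(len(tab)):
-- 		if tab[i]:
-- 			tls = ls(i, tab)
-- 			trs = rs(i, tab)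
-- 			tmin = min(tls, trs)
-- 			if mini < tmin:
-- 				mini = tmin
-- 				maxi = max(tls, trs)
-- 				bi = i
-- 			elif(tmin == mini):
-- 				tmax = max(tls, trs)
-- 				if(tmax > maxi):
-- 					maxi = tmax
-- 					bi = i
--
-- 	return (bi, mini, maxi)
-- ===== SOURCE B (Python) =====
-- def _runs(seq):
--     # out[i] = length of the contiguous block of truthy entries ending just before i
--     out = []
--     c = 0
--     for x in seq:
--         out.append(c)
--         c = c + 1 if x else 0
--     return out
--
-- def getBetter(tab):
--     left = _runs(tab)
--     right = _runs(tab[::-1])[::-1]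
--     best = (0, 0, 0)  # (bi, mini, maxi)
--     for i in range(len(tab)):
--         if tab[i]:
--             l, r = left[i], right[i]
--             tmin, tmax = min(l, r), max(l, r)
--             if tmin > best[1] or (tmin == best[1] and tmax > best[2]):
--                 best = (i, tmin, tmax)
--     return best
-- ===== Notes on version B (the rewrite author's own statement) =====
-- stated objective: faster
-- what changed: Replaces the per-cell left/right while-scans (quadratic on long truthy runs) by two linear passes that precompute all contiguous-run lengths, followed by one selection loop.
import Mathlib
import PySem

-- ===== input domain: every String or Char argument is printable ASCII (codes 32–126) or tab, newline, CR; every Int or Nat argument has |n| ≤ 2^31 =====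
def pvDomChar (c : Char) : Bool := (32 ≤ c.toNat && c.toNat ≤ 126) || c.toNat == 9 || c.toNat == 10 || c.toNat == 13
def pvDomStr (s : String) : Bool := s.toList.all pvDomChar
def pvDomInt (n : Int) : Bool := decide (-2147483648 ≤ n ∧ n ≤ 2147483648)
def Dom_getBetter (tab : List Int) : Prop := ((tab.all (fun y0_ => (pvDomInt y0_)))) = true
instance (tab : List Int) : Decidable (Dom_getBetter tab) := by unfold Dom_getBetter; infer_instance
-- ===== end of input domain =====

-- B replaces A's per-cell left/right while-scans by two linear run-length passes plus one selection loop (asymptotically faster).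

-- ===== PORT A =====
-- ls: j = i; while (j>0) and (tab[j-1]): j -= 1  (lsLoop returns the final j)
def lsLoop (tab : List Int) : Nat → Nat
  | 0 => 0
  | j+1 => if tab.getD j 0 ≠ 0 then lsLoop tab j else j+1

-- ls(i, tab) = i - j
def lsP (i : Nat) (tab : List Int) : Int := (i : Int) - (lsLoop tab i : Int)

-- rs: j = i; while (j<len(tab)-1) and (tab[j+1]): j += 1  (rsLoop returns the final j)
def rsLoop (tab : List Int) (j : Nat) : Nat :=
  if _h : j + 1 < tab.length ∧ tab.getD (j+1) 0 ≠ 0 then rsLoop tab (j+1) else j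
termination_by tab.length - j

-- rs(i, tab) = j - i
def rsP (i : Nat) (tab : List Int) : Int := (rsLoop tab i : Int) - (i : Int)

-- one iteration of A's for-loop; state = (mini, maxi, bi)
def stepA (tab : List Int) (s : Int × Int × Int) (i : Nat) : Int × Int × Int :=
  if tab.getD i 0 ≠ 0 then
    let tls := lsP i tab
    let trs := rsP i tab
    let tmin := min tls trs
    if s.1 < tmin then (tmin, max tls trs, (i : Int))
    else if tmin = s.1 then
      let tmax := max tls trs
      if tmax > s.2.1 then (s.1, tmax, (i : Int)) else s
    else s
  else s

def getBetter (tab : List Int) : Int × Int × Int :=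
  let st := (List.range tab.length).foldl (stepA tab) (0, 0, 0)
  (st.2.2, st.1, st.2.1)

-- ===== PORT B =====
-- _runs: one pass; out[i] = length of the truthy block ending just before position i
def runsB : List Int → Int → List Int
  | [], _ => []
  | x :: xs, c => c :: runsB xs (if x ≠ 0 then c + 1 else 0)

-- one iteration of B's selection loop; state = (bi, mini, maxi)
def stepB (tab : List Int) (best : Int × Int × Int) (i : Nat) : Int × Int × Int :=
  if tab.getD i 0 ≠ 0 then
    let lv := (runsB tab 0).getD i 0
    let rv := ((runsB tab.reverse 0).reverse).getD i 0
    let tmin := min lv rv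
    let tmax := max lv rv
    if tmin > best.2.1 ∨ (tmin = best.2.1 ∧ tmax > best.2.2) then ((i : Int), tmin, tmax)
    else best
  else best

def getBetter_alt (tab : List Int) : Int × Int × Int :=
  (List.range tab.length).foldl (stepB tab) (0, 0, 0)

-- ===== PRECONDITION & SPEC =====
def Spec_getBetter (tab : List Int) (out : Int × Int × Int) : Prop := out = getBetter_alt tab
instance (tab : List Int) (out : Int × Int × Int) : Decidable (Spec_getBetter tab out) := by unfold Spec_getBetter; infer_instance

-- ===== CLAIM (what is proved, stated in full; the proofs are below) =====
def Claim_equal_getBetter : Prop := ∀ (tab : List Int), Dom_getBetter tab → Spec_getBetter tab (getBetter tab)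

-- ===== LEMMAS AND PROOFS =====

-- reference function: length of the truthy block ending just before index i
def fAux : List Int → Int → Nat → Int
  | _, c, 0 => c
  | [], _, _+1 => 0
  | x :: xs, c, i+1 => fAux xs (if x ≠ 0 then c + 1 else 0) i

theorem fAux_step (tab : List Int) (c : Int) (i : Nat) :
    fAux tab c (i+1) = if tab.getD i 0 ≠ 0 then fAux tab c i + 1 else 0 := by
  induction tab generalizing c i with
  | nil => simp [fAux]
  | cons x xs ih =>
    cases i with
    | zero => simp [fAux]
    | succ i => simpa [fAux] using ih _ i

theorem runsB_length (tab : List Int) (c : Int) : (runsB tab c).length = tab.length := by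
  induction tab generalizing c with
  | nil => rfl
  | cons x xs ih => simp [runsB, ih]

theorem runsB_getD (tab : List Int) (c : Int) (i : Nat) (h : i < tab.length) :
    (runsB tab c).getD i 0 = fAux tab c i := by
  induction tab generalizing c i with
  | nil => simp at h
  | cons x xs ih =>
    cases i with
    | zero => rfl
    | succ i => simpa [runsB, fAux] using ih _ i (by simpa using h)

theorem lsLoop_le (tab : List Int) (i : Nat) : lsLoop tab i ≤ i := by
  induction i with
  | zero => exact le_rfl
  | succ i ih =>
    rw [lsLoop]
    split
    · exact le_trans ih (Nat.le_succ i)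
    · exact le_rfl

theorem lsP_eq (tab : List Int) (i : Nat) : lsP i tab = fAux tab 0 i := by
  induction i with
  | zero => simp [lsP, lsLoop, fAux]
  | succ i ih =>
    rw [lsP, lsLoop, fAux_step]
    split
    · have h1 := lsLoop_le tab i
      have h2 : ((i + 1 : Nat) : Int) - (lsLoop tab i : Int)
          = ((i : Int) - (lsLoop tab i : Int)) + 1 := by push_cast; ring
      rw [h2, ← lsP, ih]
    · simp

theorem le_rsLoop (tab : List Int) (j : Nat) : j ≤ rsLoop tab j := by
  rw [rsLoop]
  split
  · exact le_trans (Nat.le_succ j) (le_rsLoop tab (j+1))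
  · exact le_rfl
termination_by tab.length - j

theorem getD_reverse (tab : List Int) (j : Nat) (h : j < tab.length) :
    tab.reverse.getD j 0 = tab.getD (tab.length - 1 - j) 0 := by
  rw [List.getD_eq_getElem?_getD, List.getD_eq_getElem?_getD,
      List.getElem?_eq_getElem (by simpa using h),
      List.getElem?_eq_getElem (by omega)]
  simp [List.getElem_reverse]

theorem rsP_eq (tab : List Int) : ∀ k i, i < tab.length → tab.length - 1 - i = k →
    rsP i tab = fAux tab.reverse 0 k := by
  intro k
  induction k with
  | zero =>
    intro i hi hk
    rw [rsP, rsLoop, dif_neg (by rintro ⟨h1, -⟩; omega)]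
    simp [fAux]
  | succ k ih =>
    intro i hi hk
    have hi1 : i + 1 < tab.length := by omega
    have hrev : tab.reverse.getD k 0 = tab.getD (i+1) 0 := by
      rw [getD_reverse tab k (by omega)]
      congr 1
      omega
    rw [rsP, rsLoop, fAux_step, hrev]
    by_cases h : tab.getD (i+1) 0 ≠ 0
    · rw [dif_pos ⟨hi1, h⟩, if_pos h]
      have h2 := ih (i+1) hi1 (by omega)
      have h3 := le_rsLoop tab (i+1)
      rw [rsP] at h2
      omega
    · rw [dif_neg (fun hc => h hc.2), if_neg h]
      simp

-- the two selection steps agree under the swizzle (mini, maxi, bi) ↦ (bi, mini, maxi)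
theorem step_key (tab : List Int) (i : Nat) (hi : i < tab.length) (s : Int × Int × Int) :
    stepB tab (s.2.2, s.1, s.2.1) i
      = ((stepA tab s i).2.2, (stepA tab s i).1, (stepA tab s i).2.1) := by
  unfold stepA stepB
  by_cases h : tab.getD i 0 ≠ 0
  · simp only [if_pos h]
    have hlv : (runsB tab 0).getD i 0 = lsP i tab := by
      rw [runsB_getD _ _ _ hi, lsP_eq]
    have hrv : ((runsB tab.reverse 0).reverse).getD i 0 = rsP i tab := by
      rw [List.getD_eq_getElem?_getD,
          List.getElem?_reverse (by rw [runsB_length]; simpa using hi),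
          ← List.getD_eq_getElem?_getD, runsB_length, List.length_reverse,
          runsB_getD _ _ _ (by simp; omega),
          rsP_eq tab (tab.length - 1 - i) i hi rfl]
    simp only [hlv, hrv]
    by_cases h1 : s.1 < min (lsP i tab) (rsP i tab)
    · rw [if_pos h1, if_pos (Or.inl h1)]
    · rw [if_neg h1]
      by_cases h2 : min (lsP i tab) (rsP i tab) = s.1
      · rw [if_pos h2]
        by_cases h3 : max (lsP i tab) (rsP i tab) > s.2.1
        · rw [if_pos h3, if_pos (Or.inr ⟨h2, h3⟩), h2]
        · rw [if_neg h3, if_neg (by rintro (hc | ⟨-, hc⟩); exacts [h1 hc, h3 hc])]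
      · rw [if_neg h2, if_neg (by rintro (hc | ⟨hc, -⟩); exacts [h1 hc, h2 hc])]
  · simp only [if_neg h]

theorem conv_foldl (tab : List Int) :
    ∀ (l : List Nat), (∀ i ∈ l, i < tab.length) → ∀ (s : Int × Int × Int),
    ((l.foldl (stepA tab) s).2.2, (l.foldl (stepA tab) s).1, (l.foldl (stepA tab) s).2.1)
      = l.foldl (stepB tab) (s.2.2, s.1, s.2.1) := by
  intro l
  induction l with
  | nil => intro _ s; rfl
  | cons i l ih =>
    intro hl s
    have hi : i < tab.length := hl i (List.mem_cons_self ..)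
    have hl' : ∀ j ∈ l, j < tab.length := fun j hj => hl j (List.mem_cons_of_mem _ hj)
    rw [List.foldl_cons, List.foldl_cons, step_key tab i hi s]
    exact ih hl' (stepA tab s i)

-- ===== VERDICT (by name: the statement is the Claim_ definition above) =====
theorem getBetter_spec : Claim_equal_getBetter := by
  intro tab _
  show getBetter tab = getBetter_alt tab
  unfold getBetter getBetter_alt
  exact conv_foldl tab (List.range tab.length)
    (fun i hi => List.mem_range.mp hi) (0, 0, 0)
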